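-- pv_equiv track=rewrite | github.com/DEC4F/Leetcode-Sol | 1 - 200/34. Find First and Last Position of Element in Sorted Array/SearchRange.py | find
-- ===== SOURCE A (Python) =====
-- def find(nums, target, is_left):
--     l = 0
--     r = len(nums)
--     while l < r:
--         i = (l+r)//2
--         if nums[i] > target or (is_left and target == nums[i]):
--             r = i
--         else:
--             l = i+1
--     return l
-- ===== SOURCE B (Python) =====
-- def find(nums, target, is_left):
--     # Divide and conquer on actual sublists: split at the middle element and
--     # recurse into the physical left/right slice, carrying a base offset.
--     def search(sub, base):
--         if not sub:
--             return base
--         m = len(sub) // 2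
--         x = sub[m]
--         if x > target or (is_left and x == target):
--             return search(sub[:m], base)
--         return search(sub[m+1:], base + m + 1)
--     return search(nums, 0)
-- ===== Notes on version B (the rewrite author's own statement) =====
-- stated objective: alternative
-- what changed: Replaced A's in-place while-loop over (l, r) index pointers with a recursive divide-and-conquer that physically slices the list at its middle element and recurses into the left or right sublist while carrying a base offset; it inspects the same pivot values, so it matches A exactly even on unsorted input.
import Mathlib
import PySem

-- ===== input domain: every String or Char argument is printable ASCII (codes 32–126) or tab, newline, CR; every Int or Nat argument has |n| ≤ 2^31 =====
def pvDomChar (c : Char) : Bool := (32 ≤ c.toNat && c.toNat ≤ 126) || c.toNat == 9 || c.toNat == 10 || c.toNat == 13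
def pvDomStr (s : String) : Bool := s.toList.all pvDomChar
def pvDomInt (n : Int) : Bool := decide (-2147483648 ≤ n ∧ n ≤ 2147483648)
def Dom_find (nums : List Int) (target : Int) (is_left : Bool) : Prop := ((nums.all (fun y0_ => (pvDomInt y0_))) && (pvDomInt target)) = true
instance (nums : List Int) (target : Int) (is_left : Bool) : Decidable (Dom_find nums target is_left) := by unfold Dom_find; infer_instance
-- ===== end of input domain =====

-- B replaces A's while-loop over (l, r) index pointers by a recursive divide-and-conquer
-- that slices the list at its middle element and recurses into the left/right sublist
-- with a base offset; same pivot values, same result (objective: alternative, not faster).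

-- ===== PORT A =====
-- the while loop of A, as structural recursion on the state (l, r)
def findLoopA (nums : List Int) (target : Int) (is_left : Bool) (l r : Int) : Int :=
  if _h : l < r then
    let i := PySem.Int.floordiv (l + r) 2
    match PySem.List.pyGet? nums i with
    | none => l   -- IndexError; unreachable from the entry call (0 ≤ l < r ≤ nums.length)
    | some v =>
      if v > target || (is_left && target == v) then
        findLoopA nums target is_left l i
      else
        findLoopA nums target is_left (i + 1) r
  else l
termination_by (r - l).toNat
decreasing_by
  all_goals
    have he : PySem.Int.floordiv (l + r) 2 = (l + r) / 2 :=
      PySem.Int.floordiv_eq_ediv_of_pos (by norm_num)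
    omega

def find (nums : List Int) (target : Int) (is_left : Bool) : Int :=
  findLoopA nums target is_left 0 (nums.length : Int)

-- ===== PORT B =====
-- B's recursive helper: search(sub, base) on the actual sublist
def findSearchB (target : Int) (is_left : Bool) (sub : List Int) (base : Int) : Int :=
  if _h : sub.isEmpty then base
  else
    let m : Int := PySem.Int.floordiv (sub.length : Int) 2
    match PySem.List.pyGet? sub m with
    | none => base   -- IndexError; unreachable (0 ≤ m < sub.length)
    | some x =>
      if x > target || (is_left && x == target) then
        findSearchB target is_left (PySem.List.slice sub none (some m)) base
      else
        findSearchB target is_left (PySem.List.slice sub (some (m + 1)) none) (base + m + 1)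
termination_by sub.length
decreasing_by
  all_goals
    have hm : PySem.Int.floordiv (sub.length : Int) 2 = ((sub.length / 2 : Nat) : Int) :=
      PySem.Int.floordiv_natCast sub.length 2
    have hne : sub.length ≠ 0 := by
      intro h0
      exact _h (by simpa [List.isEmpty_iff, List.length_eq_zero_iff] using h0)
  · rw [hm, PySem.List.slice_to_natCast]
    simp [List.length_take]
    omega
  · have : ((sub.length / 2 : Nat) : Int) + 1 = (((sub.length / 2 + 1 : Nat)) : Int) := by
      push_cast; ring
    rw [hm, this, PySem.List.slice_from_natCast]
    simp [List.length_drop]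
    omega

def find_alt (nums : List Int) (target : Int) (is_left : Bool) : Int :=
  findSearchB target is_left nums 0

-- ===== PRECONDITION & SPEC =====
def Spec_find (nums : List Int) (target : Int) (is_left : Bool) (out : Int) : Prop := out = find_alt nums target is_left
instance (nums : List Int) (target : Int) (is_left : Bool) (out : Int) : Decidable (Spec_find nums target is_left out) := by unfold Spec_find; infer_instance

-- ===== CLAIM (what is proved, stated in full; the proofs are below) =====
def Claim_equal_find : Prop := ∀ (nums : List Int) (target : Int) (is_left : Bool), Dom_find nums target is_left → Spec_find nums target is_left (find nums target is_left)

-- ===== LEMMAS AND PROOFS =====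

theorem find_loop_eq (nums : List Int) (target : Int) (is_left : Bool) :
    ∀ (n : ℕ) (l r : Int), 0 ≤ l → l ≤ r → r ≤ (nums.length : Int) → (r - l).toNat = n →
      findLoopA nums target is_left l r
        = findSearchB target is_left ((nums.drop l.toNat).take (r - l).toNat) l := by
  intro n
  induction n using Nat.strong_induction_on with
  | _ n ih =>
    intro l r hl hlr hrn hn
    have hlen : ((nums.drop l.toNat).take (r - l).toNat).length = (r - l).toNat := by
      simp [List.length_take, List.length_drop]; omega
    unfold findLoopA findSearchB
    by_cases h : l < r
    · have hsubne : ¬ ((nums.drop l.toNat).take (r - l).toNat).isEmpty = true := by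
        simp [List.isEmpty_iff, ← List.length_eq_zero_iff, hlen]; omega
      simp only [dif_pos h, dif_neg hsubne]
      rw [hlen]
      have hi : PySem.Int.floordiv (l + r) 2 = (l + r) / 2 :=
        PySem.Int.floordiv_eq_ediv_of_pos (by norm_num)
      have hm : PySem.Int.floordiv (((r - l).toNat : Int)) 2 = (((r - l).toNat / 2 : Nat) : Int) :=
        PySem.Int.floordiv_natCast _ 2
      have hi2 : (l + r) / 2 = ((l.toNat + (r - l).toNat / 2 : Nat) : Int) := by omega
      rw [hi, hm, hi2, PySem.List.pyGet?_natCast, PySem.List.pyGet?_natCast]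
      have hAlt : l.toNat + (r - l).toNat / 2 < nums.length := by omega
      have hBlt : (r - l).toNat / 2 < ((nums.drop l.toNat).take (r - l).toNat).length := by
        rw [hlen]; omega
      rw [List.getElem?_eq_getElem hAlt, List.getElem?_eq_getElem hBlt]
      have hval : ((nums.drop l.toNat).take (r - l).toNat)[(r - l).toNat / 2]'hBlt
          = nums[l.toNat + (r - l).toNat / 2]'hAlt := by
        simp [List.getElem_take, List.getElem_drop]
      set v := nums[l.toNat + (r - l).toNat / 2]'hAlt with hv
      rw [hval]
      dsimp only
      have hbeq : (target == v) = (v == target) := by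
        by_cases hvt : target = v
        · simp [hvt]
        · simp [hvt, Ne.symm hvt]
      rw [hbeq]
      by_cases hc : (v > target || (is_left && v == target)) = true
      · simp only [hc, if_true]
        rw [PySem.List.slice_to_natCast, List.take_take]
        have hmin : min ((r - l).toNat / 2) (r - l).toNat = (((l + r) / 2 - l)).toNat := by omega
        rw [hmin, ← hi2]
        exact ih ((l + r) / 2 - l).toNat (by omega) l ((l + r) / 2) hl (by omega) (by omega) rfl
      · simp only [Bool.not_eq_true] at hc
        simp only [hc, Bool.false_eq_true, if_false]
        have hc1 : (((r - l).toNat / 2 : Nat) : Int) + 1 = (((r - l).toNat / 2 + 1 : Nat) : Int) := by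
          push_cast; ring
        rw [hc1, PySem.List.slice_from_natCast, List.drop_take, List.drop_drop]
        have ihr := ih (r - ((l + r) / 2 + 1)).toNat (by omega) ((l + r) / 2 + 1) r
          (by omega) (by omega) hrn rfl
        have hidx : ((l + r) / 2 + 1).toNat = l.toNat + ((r - l).toNat / 2 + 1) := by omega
        have hcnt : (r - l).toNat - ((r - l).toNat / 2 + 1) = (r - ((l + r) / 2 + 1)).toNat := by omega
        have hbase : l + (((r - l).toNat / 2 : Nat) : Int) + 1 = (l + r) / 2 + 1 := by omega
        rw [hbase, ← hi2, hcnt, ← hidx]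
        exact ihr
    · have hsub : ((nums.drop l.toNat).take (r - l).toNat).isEmpty = true := by
        simp [List.isEmpty_iff, ← List.length_eq_zero_iff, hlen]; omega
      rw [dif_neg h, dif_pos hsub]

-- ===== VERDICT (by name: the statement is the Claim_ definition above) =====
theorem find_spec : Claim_equal_find := by
  intro nums target is_left _
  unfold Spec_find find find_alt
  have h := find_loop_eq nums target is_left ((nums.length : Int) - 0).toNat 0
    (nums.length : Int) le_rfl (by positivity) le_rfl rfl
  simpa using h
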